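-- pv_equiv track=rewrite | github.com/arnab-007/BoolProg | Program_state_sampler/temporary_1.py | DNF_to_CNF
-- ===== SOURCE A (Python) =====
-- import itertools
--
-- def DNF_to_CNF(dnf_terms):
--     # Step 1: Generate all pairs of terms from DNF and take the conjunction of every literal in the pair
--     cnf_clauses = []
--     for literals in itertools.product(*dnf_terms):
--         clause = set()
--         for literal in literals:
--             # Add the literal to clause if it doesn't conflict with an opposite literal
--             if -literal in clause:
--                 break  # Skip conflicting combinations
--             clause.add(literal)
--         else:
--             # Only add non-conflicting clauses
--             cnf_clauses.append(sorted(clause, key=abs))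
--
--     # Step 2: Remove duplicate clauses
--     unique_clauses = []
--     seen = set()
--     for clause in cnf_clauses:
--         clause_tuple = tuple(sorted(clause, key=abs))
--         if clause_tuple not in seen:
--             unique_clauses.append(clause)
--             seen.add(clause_tuple)
--
--     return unique_clauses
-- ===== SOURCE B (Python) =====
-- def DNF_to_CNF(dnf_terms):
--     # Recursive distribution over the terms with conflict pruning, instead of
--     # materialising every itertools.product combination and filtering.
--     clauses = []
--
--     def expand(i, clause):
--         if i == len(dnf_terms):
--             clauses.append(sorted(clause, key=abs))
--             return
--         for literal in dnf_terms[i]: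
--             if -literal in clause:
--                 continue  # this whole branch would conflict; prune it
--             added = literal not in clause
--             if added:
--                 clause.add(literal)
--             expand(i + 1, clause)
--             if added:
--                 clause.remove(literal)
--
--     expand(0, set())
--
--     # First-occurrence dedup via an insertion-ordered dict keyed by the clause
--     unique = {}
--     for clause in clauses:
--         key = tuple(clause)
--         if key not in unique:
--             unique[key] = clause
--     return list(unique.values())
-- ===== Notes on version B (the rewrite author's own statement) =====
-- stated objective: alternative
-- what changed: Replaces the itertools.product enumeration with per-tuple conflict filtering by a recursive distribution over the terms that prunes a whole branch as soon as a conflicting literal appears, and dedups via an insertion-ordered dict instead of a list plus a seen-set.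
import Mathlib
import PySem

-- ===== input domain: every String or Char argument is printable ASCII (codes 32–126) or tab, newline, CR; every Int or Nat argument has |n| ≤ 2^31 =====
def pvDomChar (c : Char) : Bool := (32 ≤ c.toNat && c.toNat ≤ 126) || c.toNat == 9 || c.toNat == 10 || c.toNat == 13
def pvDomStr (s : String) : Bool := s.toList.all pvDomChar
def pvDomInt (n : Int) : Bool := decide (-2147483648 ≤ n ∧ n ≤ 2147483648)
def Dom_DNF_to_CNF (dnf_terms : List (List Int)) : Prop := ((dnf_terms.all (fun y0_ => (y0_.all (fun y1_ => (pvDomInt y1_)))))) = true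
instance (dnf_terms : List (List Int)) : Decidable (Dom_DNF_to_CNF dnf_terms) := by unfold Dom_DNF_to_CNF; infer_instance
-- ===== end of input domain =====

-- B replaces the itertools.product enumeration + per-tuple conflict filter by a
-- recursive distribution over the terms that prunes a whole branch as soon as a
-- conflicting literal appears (objective: alternative — same worst case, prunes early).

-- ===== PORT A =====

-- sorted(clause, key=abs)
def pvSortAbs (c : List Int) : List Int := PySem.List.sorted c (fun x => |x|) false

-- itertools.product(*dnf_terms), rightmost factor fastest
def pvProd : List (List Int) → List (List Int)
  | [] => [[]]
  | t :: ts => t.flatMap (fun x => (pvProd ts).map (fun l => x :: l))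

-- the inner 'for literal in literals: … break / else' loop; none = break hit
def pvBuild : List Int → PySem.Set Int → Option (PySem.Set Int)
  | [], c => some c
  | l :: ls, c => if (-l) ∈ c then none else pvBuild ls (PySem.Set.add c l)

-- body of the Step-1 loop: run the inner literal loop, append the sorted clause unless it broke
def pvStep1 (acc : List (List Int)) (lits : List Int) : List (List Int) :=
  match pvBuild lits PySem.Set.empty with
  | none => acc
  | some clause => acc ++ [pvSortAbs clause]

def DNF_to_CNF (dnf_terms : List (List Int)) : List (List Int) :=
  -- Step 1: cnf_clauses, then Step 2: the (unique_clauses, seen) fold; return unique_clauses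
  (((pvProd dnf_terms).foldl pvStep1 []).foldl
    (fun p clause =>
      if pvSortAbs clause ∈ p.2 then p
      else (p.1 ++ [clause], PySem.Set.add p.2 (pvSortAbs clause)))
    (([], PySem.Set.empty) : List (List Int) × PySem.Set (List Int))).1

-- ===== PORT B =====

-- expand(i, clause): recursion over the remaining terms; prune on conflict
def pvExpand : List (List Int) → PySem.Set Int → List (List Int)
  | [], clause => [pvSortAbs clause]
  | t :: ts, clause =>
      t.flatMap (fun lit =>
        if (-lit) ∈ clause then [] else pvExpand ts (PySem.Set.add clause lit))

def DNF_to_CNF_alt (dnf_terms : List (List Int)) : List (List Int) :=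
  ((pvExpand dnf_terms PySem.Set.empty).foldl
      (fun d clause => if d.contains clause then d else d.insert clause clause)
      (PySem.Dict.empty : PySem.Dict (List Int) (List Int))).values

-- ===== PRECONDITION & SPEC =====
def Spec_DNF_to_CNF (dnf_terms : List (List Int)) (out : List (List Int)) : Prop := out = DNF_to_CNF_alt dnf_terms
instance (dnf_terms : List (List Int)) (out : List (List Int)) : Decidable (Spec_DNF_to_CNF dnf_terms out) := by unfold Spec_DNF_to_CNF; infer_instance

-- ===== CLAIM (what is proved, stated in full; the proofs are below) =====
def Claim_equal_DNF_to_CNF : Prop := ∀ (dnf_terms : List (List Int)), Dom_DNF_to_CNF dnf_terms → Spec_DNF_to_CNF dnf_terms (DNF_to_CNF dnf_terms)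

-- ===== LEMMAS AND PROOFS =====

-- the append-on-some foldl of Step 1 is a filterMap
theorem foldl_match_filterMap :
    ∀ (xs : List (List Int)) (acc : List (List Int)),
      xs.foldl pvStep1 acc
        = acc ++ xs.filterMap (fun lits => (pvBuild lits PySem.Set.empty).map pvSortAbs) := by
  intro xs
  induction xs with
  | nil => intro acc; simp
  | cons x xs ih =>
      intro acc
      cases h : pvBuild x ([] : PySem.Set Int) <;>
        simp [List.foldl_cons, pvStep1, PySem.Set.empty, h, ih]

-- B's pruned recursion enumerates exactly A's product-then-filter clauses
theorem expand_eq_filterMap :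
    ∀ (ts : List (List Int)) (c : PySem.Set Int),
      pvExpand ts c =
        (pvProd ts).filterMap (fun lits => (pvBuild lits c).map pvSortAbs) := by
  intro ts
  induction ts with
  | nil => intro c; simp [pvExpand, pvProd, pvBuild]
  | cons t ts ih =>
      intro c
      simp only [pvExpand, pvProd, List.filterMap_flatMap, List.filterMap_map]
      refine List.flatMap_congr (fun x _ => ?_)
      by_cases hx : (-x) ∈ c
      · simp [pvBuild, hx, Function.comp]
      · simp [pvBuild, hx, Function.comp, ih]

-- every clause of Step 1 is already abs-sorted, so A's dedup key is the clause itself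
theorem sortAbs_fixed (cnf : List (List Int))
    (h : ∀ c ∈ cnf, pvSortAbs c = c) :
    ∀ (u : List (List Int)) (s : PySem.Set (List Int))
      (d : PySem.Dict (List Int) (List Int)),
      u = d.values → s = d.keys →
      (cnf.foldl
        (fun p clause =>
          if pvSortAbs clause ∈ p.2 then p
          else (p.1 ++ [clause], PySem.Set.add p.2 (pvSortAbs clause)))
        (u, s)).1
      =
      (cnf.foldl
        (fun d clause => if d.contains clause then d else d.insert clause clause)
        d).values := by
  induction cnf with
  | nil => intro u s d hu hs; simpa using hu
  | cons c cnf ih =>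
      intro u s d hu hs
      have hc : pvSortAbs c = c := h c (by simp)
      have hrest : ∀ x ∈ cnf, pvSortAbs x = x := fun x hx => h x (by simp [hx])
      simp only [List.foldl_cons, hc]
      by_cases hmem : c ∈ s
      · have hcont : d.contains c = true := by
          rw [PySem.Dict.contains_eq_decide_mem_keys]
          simp [← hs, hmem]
        simp only [if_pos hmem, hcont, if_true]
        exact ih hrest u s d hu hs
      · have hcont : d.contains c = false := by
          rw [PySem.Dict.contains_eq_decide_mem_keys]
          simp [← hs, hmem]
        simp only [if_neg hmem, hcont, Bool.false_eq_true, if_false]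
        refine ih hrest _ _ (d.insert c c) ?_ ?_
        · simp [PySem.Dict.values, PySem.Dict.items_insert_of_not_contains d c hcont, hu]
        · rw [hs, PySem.Set.add_of_not_mem (hs ▸ hmem)]
          simp [PySem.Dict.keys, PySem.Dict.items_insert_of_not_contains d c hcont]

-- ===== VERDICT (by name: the statement is the Claim_ definition above) =====
theorem DNF_to_CNF_spec : Claim_equal_DNF_to_CNF := by
  intro dnf_terms _
  unfold Spec_DNF_to_CNF DNF_to_CNF DNF_to_CNF_alt
  rw [foldl_match_filterMap, expand_eq_filterMap]
  simp only [List.nil_append]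
  refine sortAbs_fixed _ ?_ _ _ _ rfl rfl
  intro c hc
  rcases List.mem_filterMap.mp hc with ⟨lits, _, hsome⟩
  cases hb : pvBuild lits PySem.Set.empty with
  | none => rw [hb] at hsome; simp at hsome
  | some r =>
      rw [hb] at hsome
      simp only [Option.map_some, Option.some.injEq] at hsome
      subst hsome
      exact PySem.List.sorted_sorted r (fun x => |x|)
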